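-- pv_equiv track=rewrite | github.com/holo-q/errloom | errloom/argp.py | remove_deploy_args
-- ===== SOURCE A (Python) =====
-- def safe_list_remove(l, value):
--     """Safely remove a value from a list."""
--     if not l:
--         return
--     try:
--         l.remove(value)
--     except:
--         pass
--
-- def remove_deploy_args(oargs):
--     """Remove deployment-related arguments from the argument list."""
--     safe_list_remove(oargs, '--dev')
--     safe_list_remove(oargs, '--run')
--
--     # Remove all that start with vastai or vai
--     for prefixed_arg in oargs[:]:  # Create a copy to avoid modification during iteration
--         # Remove dashes
--         arg = prefixed_arg.replace('-', '')
--         if arg.startswith('vastai') or arg.startswith('vai') or arg.endswith('vai'):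
--             safe_list_remove(oargs, prefixed_arg)
--
--     return oargs
-- ===== SOURCE B (Python) =====
-- def remove_deploy_args(oargs):
--     """Remove deployment-related arguments from the argument list (single linear pass)."""
--     removed_dev = False
--     removed_run = False
--     result = []
--     for a in oargs:
--         if a == '--dev' and not removed_dev:
--             removed_dev = True
--             continue
--         if a == '--run' and not removed_run:
--             removed_run = True
--             continue
--         arg = a.replace('-', '')
--         if arg.startswith('vastai') or arg.startswith('vai') or arg.endswith('vai'):
--             continue
--         result.append(a)
--     oargs[:] = result
--     return oargs
-- ===== Notes on version B (the rewrite author's own statement) =====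
-- stated objective: alternative
-- what changed: Replaces A's first-remove of '--dev'/'--run' plus a copy-and-iterate loop that calls list.remove (an inner linear scan) for every matching element with a single pass that keeps two 'already removed' booleans and filters into a fresh list assigned back via oargs[:]=; it trades A's in-place repeated removals for one rebuild of the list.
import Mathlib
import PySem

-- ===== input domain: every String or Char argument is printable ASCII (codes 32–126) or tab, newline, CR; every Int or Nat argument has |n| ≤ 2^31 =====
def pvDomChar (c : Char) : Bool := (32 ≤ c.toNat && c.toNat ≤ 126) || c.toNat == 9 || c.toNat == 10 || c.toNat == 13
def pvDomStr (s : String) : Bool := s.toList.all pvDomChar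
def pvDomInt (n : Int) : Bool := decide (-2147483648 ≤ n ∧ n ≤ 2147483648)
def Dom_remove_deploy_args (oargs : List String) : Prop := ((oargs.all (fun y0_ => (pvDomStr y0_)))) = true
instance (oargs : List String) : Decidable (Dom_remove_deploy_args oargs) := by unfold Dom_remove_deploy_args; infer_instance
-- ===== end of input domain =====

-- B replaces A's remove-then-rescan (list.remove called inside a loop over a copy) with a
-- single filtering pass keeping two 'already removed' booleans; equivalence of the RETURN value
-- is proved (both Pythons also mutate oargs in place to the same final contents, B via oargs[:]=).


-- ===== PORT A =====
-- safe_list_remove: empty guard, then l.remove(value) with the exception swallowed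
def pvSafeRemove (l : List String) (v : String) : List String :=
  if l = [] then l
  else
    match PySem.List.remove? l v with
    | some l' => l'     -- l.remove(value) succeeded
    | none => l         -- ValueError swallowed by 'except: pass'

-- the test 'arg.startswith('vastai') or arg.startswith('vai') or arg.endswith('vai')'
def pvDeployPredA (p : String) : Bool :=
  let arg := PySem.Str.replace p "-" ""
  PySem.Str.startswith arg "vastai" || PySem.Str.startswith arg "vai" || PySem.Str.endswith arg "vai"

def remove_deploy_args (oargs : List String) : List String :=
  let o1 := pvSafeRemove oargs "--dev"
  let o2 := pvSafeRemove o1 "--run"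
  -- for prefixed_arg in oargs[:] (a copy): remove matching args from the live list
  o2.foldl (fun acc p => if pvDeployPredA p then pvSafeRemove acc p else acc) o2

-- ===== PORT B =====
def pvIsDeployB (a : String) : Bool :=
  let arg := PySem.Str.replace a "-" ""
  PySem.Str.startswith arg "vastai" || PySem.Str.startswith arg "vai" || PySem.Str.endswith arg "vai"

-- single pass with two 'already removed' booleans, building the result list
def pvScanB (rd rr : Bool) : List String → List String
  | [] => []
  | a :: rest =>
    if a = "--dev" ∧ rd = false then pvScanB true rr rest
    else if a = "--run" ∧ rr = false then pvScanB rd true rest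
    else if pvIsDeployB a then pvScanB rd rr rest
    else a :: pvScanB rd rr rest

def remove_deploy_args_alt (oargs : List String) : List String :=
  pvScanB false false oargs

-- ===== PRECONDITION & SPEC =====
def Spec_remove_deploy_args (oargs : List String) (out : List String) : Prop := out = remove_deploy_args_alt oargs
instance (oargs : List String) (out : List String) : Decidable (Spec_remove_deploy_args oargs out) := by unfold Spec_remove_deploy_args; infer_instance

-- ===== CLAIM (what is proved, stated in full; the proofs are below) =====
def Claim_equal_remove_deploy_args : Prop := ∀ (oargs : List String), Dom_remove_deploy_args oargs → Spec_remove_deploy_args oargs (remove_deploy_args oargs)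

-- ===== LEMMAS AND PROOFS =====

-- "remove the first occurrence of v" as a plain recursion
def pvDrop (v : String) : List String → List String
  | [] => []
  | a :: rest => if a = v then rest else a :: pvDrop v rest

theorem pvDrop_not_mem (v : String) (l : List String) (h : v ∉ l) : pvDrop v l = l := by
  induction l with
  | nil => rfl
  | cons a rest ih =>
    simp only [List.mem_cons, not_or] at h
    simp [pvDrop, Ne.symm h.1, ih h.2]

theorem remove?_eq_drop (v : String) (l : List String) :
    PySem.List.remove? l v = if v ∈ l then some (pvDrop v l) else none := by
  induction l with
  | nil => simp [PySem.List.remove?_eq_none_iff]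
  | cons a rest ih =>
    by_cases hav : a = v
    · subst hav; simp [pvDrop]
    · rw [PySem.List.remove?_cons_of_ne rest hav, ih]
      by_cases hm : v ∈ rest
      · simp [hm, pvDrop, hav]
      · simp [hm, pvDrop, hav, Ne.symm hav]

theorem safeRemove_eq_drop (l : List String) (v : String) : pvSafeRemove l v = pvDrop v l := by
  unfold pvSafeRemove
  rcases l with _ | ⟨a, rest⟩
  · simp [pvDrop]
  · rw [remove?_eq_drop]
    by_cases hm : v ∈ a :: rest
    · simp [hm]
    · simp [hm, pvDrop_not_mem v _ hm]

theorem pvDrop_append (v : String) (k rest : List String) (h : v ∉ k) :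
    pvDrop v (k ++ v :: rest) = k ++ rest := by
  induction k with
  | nil => simp [pvDrop]
  | cons b k' ih =>
    simp only [List.mem_cons, not_or] at h
    simp [pvDrop, Ne.symm h.1, ih h.2]

-- invariant of A's removal loop: iterating over l with accumulator k ++ l,
-- where k holds already-kept (pred-false) elements, yields k ++ filter
theorem fold_filter (l : List String) : ∀ (k : List String),
    (∀ x ∈ k, pvDeployPredA x = false) →
    List.foldl (fun acc p => if pvDeployPredA p then pvSafeRemove acc p else acc) (k ++ l) l
      = k ++ l.filter (fun a => !pvDeployPredA a) := by
  induction l with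
  | nil => intro k _; simp
  | cons a rest ih =>
    intro k hk
    by_cases hp : pvDeployPredA a = true
    · have hak : a ∉ k := fun hm => by simp [hk a hm] at hp
      have hstep : pvSafeRemove (k ++ a :: rest) a = k ++ rest := by
        rw [safeRemove_eq_drop, pvDrop_append a k rest hak]
      simp only [List.foldl_cons, hp, if_true, hstep]
      rw [ih k hk]
      simp [hp]
    · have hp' : pvDeployPredA a = false := by simpa using hp
      have hk' : ∀ x ∈ k ++ [a], pvDeployPredA x = false := by
        intro x hx
        rcases List.mem_append.mp hx with h | h
        · exact hk x h
        · simp only [List.mem_singleton] at h; subst h; exact hp'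
      simp only [List.foldl_cons, hp', if_false, Bool.false_eq_true]
      have : k ++ a :: rest = (k ++ [a]) ++ rest := by simp
      rw [this, ih (k ++ [a]) hk']
      simp [hp']

-- optional first removal: if b then untouched else drop the first v
def pvR (b : Bool) (v : String) (l : List String) : List String :=
  if b then l else pvDrop v l

theorem pvR_cons (b : Bool) (v a : String) (rest : List String) (h : a ≠ v ∨ b = true) :
    pvR b v (a :: rest) = a :: pvR b v rest := by
  cases b with
  | true => rfl
  | false =>
    have ha : a ≠ v := h.resolve_right (by simp)
    simp [pvR, pvDrop, ha]

theorem scanB_eq (l : List String) : ∀ (rd rr : Bool),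
    pvScanB rd rr l = (pvR rr "--run" (pvR rd "--dev" l)).filter (fun a => !pvDeployPredA a) := by
  induction l with
  | nil => intro rd rr; cases rd <;> cases rr <;> simp [pvScanB, pvR, pvDrop]
  | cons a rest ih =>
    intro rd rr
    by_cases hd : a = "--dev" ∧ rd = false
    · obtain ⟨ha, hrd⟩ := hd; subst ha; subst hrd
      have h1 : pvR false "--dev" ("--dev" :: rest) = rest := by simp [pvR, pvDrop]
      simp only [pvScanB, h1]
      have := ih true rr
      simpa [pvR] using this
    · by_cases hr : a = "--run" ∧ rr = false
      · obtain ⟨ha, hrr⟩ := hr; subst ha; subst hrr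
        have hne : ("--run" : String) ≠ "--dev" := by decide
        have h1 : pvR rd "--dev" ("--run" :: rest) = "--run" :: pvR rd "--dev" rest :=
          pvR_cons rd "--dev" "--run" rest (Or.inl hne)
        have h2 : pvR false "--run" ("--run" :: pvR rd "--dev" rest) = pvR rd "--dev" rest := by
          simp [pvR, pvDrop]
        simp only [pvScanB, if_neg hd, h1, h2]
        have := ih rd true
        simpa [pvR] using this
      · -- a passes both flag branches
        have h1 : pvR rd "--dev" (a :: rest) = a :: pvR rd "--dev" rest := by
          apply pvR_cons
          by_cases ha : a = "--dev"
          · right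
            cases rd with
            | true => rfl
            | false => exact absurd ⟨ha, rfl⟩ hd
          · exact Or.inl ha
        have h2 : pvR rr "--run" (a :: pvR rd "--dev" rest)
            = a :: pvR rr "--run" (pvR rd "--dev" rest) := by
          apply pvR_cons
          by_cases ha : a = "--run"
          · right
            cases rr with
            | true => rfl
            | false => exact absurd ⟨ha, rfl⟩ hr
          · exact Or.inl ha
        have hpred : pvIsDeployB a = pvDeployPredA a := rfl
        simp only [pvScanB, if_neg hd, if_neg hr, h1, h2, List.filter_cons, hpred, ih rd rr]
        by_cases hp : pvDeployPredA a = true <;> simp [hp]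

-- ===== VERDICT (by name: the statement is the Claim_ definition above) =====
theorem remove_deploy_args_spec : Claim_equal_remove_deploy_args := by
  intro oargs _
  show remove_deploy_args oargs = remove_deploy_args_alt oargs
  unfold remove_deploy_args remove_deploy_args_alt
  have hA := fold_filter
    (pvSafeRemove (pvSafeRemove oargs "--dev") "--run") [] (by intro x hx; simp at hx)
  simp only [List.nil_append] at hA
  rw [hA, scanB_eq oargs false false]
  simp [pvR, safeRemove_eq_drop]
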